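-- pv_equiv track=rewrite | github.com/pigeonai-org/ViDove | src/audio/audio_agent.py | _parse_srt_to_segments
-- ===== SOURCE A (Python) =====
-- def _parse_srt_to_segments(srt_text: str):
--     # Convert SRT string to list of dicts with 'start','end','text' (time strings HH:MM:SS,mmm)
--     segments = []
--     if not srt_text:
--         return segments
--     lines = [ln.strip("\ufeff").strip() for ln in srt_text.splitlines()]
--     i = 0
--     while i < len(lines):
--         # skip index line if numeric
--         if lines[i].isdigit():
--             i += 1
--         if i >= len(lines):
--             break
--         # time line
--         if "-->" in lines[i]:
--             time_line = lines[i]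
--             i += 1
--             text_lines = []
--             while i < len(lines) and lines[i] != "":
--                 text_lines.append(lines[i])
--                 i += 1
--             # skip blank
--             while i < len(lines) and lines[i] == "":
--                 i += 1
--             try:
--                 start_str, end_str = [t.strip() for t in time_line.split("-->")]
--                 text = " ".join(text_lines).strip()
--                 if text:
--                     segments.append(
--                         {"start": start_str, "end": end_str, "text": text}
--                     )
--             except Exception:
--                 # ignore malformed entries
--                 pass
--         else:
--             i += 1
--     return segments
-- ===== SOURCE B (Python) =====
-- def _parse_srt_to_segments(srt_text: str):
--     # Block-based decomposition: split stripped lines into blank-separated blocks,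
--     # then emit one segment per block from its first '-->' line.
--     segments = []
--     if not srt_text:
--         return segments
--     lines = [ln.strip("\ufeff").strip() for ln in srt_text.splitlines()]
--     blocks = []
--     cur = []
--     for ln in lines:
--         if ln == "":
--             if cur:
--                 blocks.append(cur)
--                 cur = []
--         else:
--             cur.append(ln)
--     if cur:
--         blocks.append(cur)
--     for block in blocks:
--         for idx in range(len(block)):
--             ln = block[idx]
--             if "-->" in ln:
--                 parts = [t.strip() for t in ln.split("-->")]
--                 if len(parts) == 2:
--                     start_str, end_str = parts
--                     text = " ".join(block[idx + 1:]).strip()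
--                     if text:
--                         segments.append({"start": start_str, "end": end_str, "text": text})
--                 break
--     return segments
-- ===== Notes on version B (the rewrite author's own statement) =====
-- stated objective: alternative
-- what changed: A's single index-driven while loop with inner digit-skip/text-accumulation/blank-skip phases is replaced by a two-phase decomposition: first group the stripped lines into blank-separated blocks, then emit at most one segment per block from its first time-separator line.
import Mathlib
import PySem

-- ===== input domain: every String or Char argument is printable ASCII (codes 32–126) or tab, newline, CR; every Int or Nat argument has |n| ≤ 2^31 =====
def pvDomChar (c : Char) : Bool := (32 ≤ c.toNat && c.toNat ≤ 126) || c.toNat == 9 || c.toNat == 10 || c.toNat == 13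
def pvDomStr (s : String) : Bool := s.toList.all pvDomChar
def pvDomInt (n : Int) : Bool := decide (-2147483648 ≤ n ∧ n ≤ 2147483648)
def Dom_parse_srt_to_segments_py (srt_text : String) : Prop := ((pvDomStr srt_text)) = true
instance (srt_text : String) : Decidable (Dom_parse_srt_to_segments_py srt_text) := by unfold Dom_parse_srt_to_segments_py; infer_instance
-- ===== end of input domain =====

-- B replaces A's index-driven while loop with a two-phase decomposition (blank-separated blocks,
-- then one segment per block from its first '-->' line); objective: alternative decomposition, same cost.

-- "-->" as a char list (literal occurring in both Pythons)
def pvArrow : List Char := "-->".toList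

-- stripped lines: [ln.strip("\ufeff").strip() for ln in srt_text.splitlines()]  (same line in both Pythons)
def pvLines (srt_text : String) : List (List Char) :=
  (PySem.Chars.splitlines srt_text.toList).map
    (fun ln => PySem.Chars.strip (PySem.Chars.stripChars ln ['\ufeff']))

-- ===== PORT A =====
-- try: start,end = [t.strip() for t in time_line.split("-->")]; text = " ".join(text_lines).strip(); if text: append  /  except: pass
def pvSegA (time_line : List Char) (text_lines : List (List Char)) : List (List (String × String)) :=
  match (PySem.Chars.splitOn time_line pvArrow).map PySem.Chars.strip with
  | [start_str, end_str] =>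
      let text := PySem.Chars.strip (PySem.Chars.join [' '] text_lines)
      if text ≠ [] then
        [[("start", String.ofList start_str), ("end", String.ofList end_str), ("text", String.ofList text)]]
      else []
  | _ => []

-- termination helpers for pvLoopA (cited in decreasing_by)
lemma pv_lt1 (x : List Char) (xs : List (List Char)) :
    ((xs.dropWhile (· ≠ [])).dropWhile (· = [])).length < (x :: xs).length := by
  have h1 := List.length_dropWhile_le (fun l => decide (l = [])) (xs.dropWhile (· ≠ []))
  have h2 := List.length_dropWhile_le (fun l => decide (l ≠ [])) xs
  simp only [List.length_cons]; omega

lemma pv_lt2 (x y : List Char) (xs : List (List Char)) :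
    ((xs.dropWhile (· ≠ [])).dropWhile (· = [])).length < (x :: y :: xs).length := by
  have := pv_lt1 y xs
  simp only [List.length_cons] at *; omega

-- A's while loop over the index i, as structural recursion on the remaining lines
def pvLoopA (ls : List (List Char)) : List (List (String × String)) :=
  match ls with
  | [] => []
  | l :: rest =>
    if PySem.Chars.strIsdigit l then
      -- skip index line if numeric; then: if i >= len(lines): break
      match rest with
      | [] => []
      | l' :: r' =>
        if PySem.Chars.isIn pvArrow l' then
          pvSegA l' (r'.takeWhile (· ≠ [])) ++
            pvLoopA ((r'.dropWhile (· ≠ [])).dropWhile (· = []))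
        else pvLoopA r'
    else
      if PySem.Chars.isIn pvArrow l then
        pvSegA l (rest.takeWhile (· ≠ [])) ++
          pvLoopA ((rest.dropWhile (· ≠ [])).dropWhile (· = []))
      else pvLoopA rest
termination_by ls.length
decreasing_by
  all_goals first
    | exact pv_lt2 _ _ _
    | exact pv_lt1 _ _
    | (simp only [List.length_cons]; omega)

def parse_srt_to_segments_py (srt_text : String) : List (List (String × String)) :=
  if srt_text.toList = [] then [] else pvLoopA (pvLines srt_text)

-- ===== PORT B =====
-- B's inner for loop over a block: stop at the first '-->' line, text = the lines after it
def pvScanB (block : List (List Char)) : List (List (String × String)) :=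
  match block with
  | [] => []
  | ln :: tl =>
    if PySem.Chars.isIn pvArrow ln then
      match (PySem.Chars.splitOn ln pvArrow).map PySem.Chars.strip with
      | [start_str, end_str] =>
          let text := PySem.Chars.strip (PySem.Chars.join [' '] tl)
          if text ≠ [] then
            [[("start", String.ofList start_str), ("end", String.ofList end_str), ("text", String.ofList text)]]
          else []
      | _ => []
    else pvScanB tl

-- B's first for loop: accumulate non-empty lines into cur, flush at blanks and at the end
def pvBlocksB (acc : List (List (List Char))) (cur : List (List Char)) :
    List (List Char) → List (List (List Char))
  | [] => if cur = [] then acc else acc ++ [cur]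
  | l :: ls =>
    if l = [] then
      if cur = [] then pvBlocksB acc [] ls else pvBlocksB (acc ++ [cur]) [] ls
    else pvBlocksB acc (cur ++ [l]) ls

def parse_srt_to_segments_py_alt (srt_text : String) : List (List (String × String)) :=
  if srt_text.toList = [] then []
  else (pvBlocksB [] [] (pvLines srt_text)).flatMap pvScanB

-- ===== PRECONDITION & SPEC =====
def Spec_parse_srt_to_segments_py (srt_text : String) (out : List (List (String × String))) : Prop := out = parse_srt_to_segments_py_alt srt_text
instance (srt_text : String) (out : List (List (String × String))) : Decidable (Spec_parse_srt_to_segments_py srt_text out) := by unfold Spec_parse_srt_to_segments_py; infer_instance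

-- ===== CLAIM (what is proved, stated in full; the proofs are below) =====
def Claim_equal_parse_srt_to_segments_py : Prop := ∀ (srt_text : String), Dom_parse_srt_to_segments_py srt_text → Spec_parse_srt_to_segments_py srt_text (parse_srt_to_segments_py srt_text)

-- ===== LEMMAS AND PROOFS =====

lemma pvLoopA_cons (l : List Char) (rest : List (List Char)) :
    pvLoopA (l :: rest) =
      if PySem.Chars.strIsdigit l then
        match rest with
        | [] => []
        | l' :: r' =>
          if PySem.Chars.isIn pvArrow l' then
            pvSegA l' (r'.takeWhile (· ≠ [])) ++
              pvLoopA ((r'.dropWhile (· ≠ [])).dropWhile (· = []))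
          else pvLoopA r'
      else
        if PySem.Chars.isIn pvArrow l then
          pvSegA l (rest.takeWhile (· ≠ [])) ++
            pvLoopA ((rest.dropWhile (· ≠ [])).dropWhile (· = []))
        else pvLoopA rest := by
  rw [pvLoopA.eq_def]

-- a numeric line contains no "-->"
lemma pv_digit_not_arrow (l : List Char) (h : PySem.Chars.strIsdigit l = true) :
    PySem.Chars.isIn pvArrow l = false := by
  rw [PySem.Chars.isIn_eq_false_iff]
  intro hinf
  have hm : '-' ∈ l := hinf.mem (by decide)
  simp [PySem.Chars.strIsdigit, List.all_eq_true] at h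
  have := h.2 '-' hm
  simp [PySem.Chars.isdigit] at this

-- skipping one arrow-free line does not change A's loop
lemma pv_loopA_skip (ls : List (List Char)) : ∀ l, PySem.Chars.isIn pvArrow l = false →
    pvLoopA (l :: ls) = pvLoopA ls := by
  induction ls with
  | nil =>
    intro l h
    rw [pvLoopA_cons]
    by_cases hd : PySem.Chars.strIsdigit l = true
    · simp [hd, pvLoopA]
    · simp [hd, h, pvLoopA]
  | cons l' r' ih =>
    intro l h
    rw [pvLoopA_cons]
    by_cases hd : PySem.Chars.strIsdigit l = true
    · simp only [hd, if_true]
      by_cases ha : PySem.Chars.isIn pvArrow l' = true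
      · have hd' : PySem.Chars.strIsdigit l' = false := by
          cases hdd : PySem.Chars.strIsdigit l'
          · rfl
          · rw [pv_digit_not_arrow l' hdd] at ha; exact absurd ha (by simp)
        conv_rhs => rw [pvLoopA_cons]
        simp [hd', ha]
      · rw [ih l' (by simpa using ha)]
        simp [ha]
    · simp [hd, h]

-- pvBlocksB with a non-trivial accumulator
lemma pv_blocksB_acc (ls : List (List Char)) : ∀ acc cur,
    pvBlocksB acc cur ls = acc ++ pvBlocksB [] cur ls := by
  induction ls with
  | nil => intro acc cur; by_cases h : cur = [] <;> simp [pvBlocksB, h]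
  | cons l ls ih =>
    intro acc cur
    rw [pvBlocksB, pvBlocksB]
    by_cases hl : l = []
    · simp only [hl]
      by_cases hc : cur = []
      · simp only [hc]; exact ih acc []
      · simp only [if_neg hc]
        rw [ih (acc ++ [cur]) [], ih ([] ++ [cur]) []]
        simp
    · simp only [if_neg hl]
      rw [ih acc (cur ++ [l]), ih [] (cur ++ [l])]

-- leading blanks with empty current block are ignored
lemma pv_blocksB_skip_blanks (ls : List (List Char)) :
    pvBlocksB [] [] (ls.dropWhile (· = [])) = pvBlocksB [] [] ls := by
  induction ls with
  | nil => simp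
  | cons l ls ih =>
    by_cases hl : l = []
    · rw [List.dropWhile_cons_of_pos (by simp [hl]), ih, pvBlocksB]
      simp [hl]
    · rw [List.dropWhile_cons_of_neg (by simp [hl])]

-- a non-empty current block absorbs lines up to the next blank
lemma pv_blocksB_cons (ls : List (List Char)) : ∀ cur, cur ≠ [] →
    pvBlocksB [] cur ls =
      (cur ++ ls.takeWhile (· ≠ [])) ::
        pvBlocksB [] [] ((ls.dropWhile (· ≠ [])).dropWhile (· = [])) := by
  induction ls with
  | nil => intro cur hc; simp [pvBlocksB, hc]
  | cons l ls ih =>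
    intro cur hc
    rw [pvBlocksB]
    by_cases hl : l = []
    · simp only [hl, if_neg hc]
      rw [pv_blocksB_acc,
          List.takeWhile_cons_of_neg (by simp),
          List.dropWhile_cons_of_neg (by simp),
          List.dropWhile_cons_of_pos (by simp), pv_blocksB_skip_blanks]
      simp
    · simp only [if_neg hl]
      rw [ih (cur ++ [l]) (by simp),
          List.takeWhile_cons_of_pos (by simp [hl]),
          List.dropWhile_cons_of_pos (by simp [hl])]
      simp

-- B's scan ignores a prefix of arrow-free lines
lemma pv_scanB_skip (pre : List (List Char)) (rest : List (List Char))
    (h : ∀ l ∈ pre, PySem.Chars.isIn pvArrow l = false) :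
    pvScanB (pre ++ rest) = pvScanB rest := by
  induction pre with
  | nil => simp
  | cons p pre ih =>
    rw [List.cons_append, pvScanB]
    simp only [h p (by simp), Bool.false_eq_true, if_false]
    exact ih (fun l hl => h l (by simp [hl]))

-- on an arrow-headed block, B's scan is A's segment constructor
lemma pv_scanB_arrow (l : List Char) (tl : List (List Char))
    (h : PySem.Chars.isIn pvArrow l = true) :
    pvScanB (l :: tl) = pvSegA l tl := by
  rw [pvScanB]
  simp only [h, if_true]
  rfl

-- the final flush of an arrow-free partial block produces no segment
lemma pv_base (cur : List (List Char)) (h : ∀ l ∈ cur, PySem.Chars.isIn pvArrow l = false) :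
    (pvBlocksB [] cur []).flatMap pvScanB = [] := by
  by_cases hc : cur = []
  · simp [pvBlocksB, hc]
  · simp only [pvBlocksB, if_neg hc, List.nil_append, List.flatMap_cons, List.flatMap_nil,
      List.append_nil]
    have := pv_scanB_skip cur [] h
    simpa using this

-- the main invariant: A's loop equals B's block processing, for any arrow-free partial block cur
lemma pv_main (n : Nat) : ∀ ls : List (List Char), ls.length ≤ n →
    ∀ cur, (∀ l ∈ cur, l ≠ [] ∧ PySem.Chars.isIn pvArrow l = false) →
    pvLoopA ls = (pvBlocksB [] cur ls).flatMap pvScanB := by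
  induction n with
  | zero =>
    intro ls hlen cur hcur
    have : ls = [] := List.eq_nil_of_length_eq_zero (Nat.le_zero.mp hlen)
    subst this
    rw [pv_base cur (fun l hl => (hcur l hl).2), pvLoopA]
  | succ n ih =>
    intro ls hlen cur hcur
    match ls with
    | [] => rw [pv_base cur (fun l hl => (hcur l hl).2), pvLoopA]
    | l :: rest =>
      simp only [List.length_cons, Nat.succ_le_succ_iff] at hlen
      by_cases hl : l = []
      · subst hl
        rw [pv_loopA_skip rest [] (by decide), pvBlocksB]
        have hrest := ih rest hlen [] (by simp)
        by_cases hc : cur = []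
        · simpa [hc] using hrest
        · have h0 : pvScanB cur = [] := by
            simpa using pv_scanB_skip cur [] (fun l hl => (hcur l hl).2)
          rw [if_pos rfl, if_neg hc, pv_blocksB_acc]
          simp [h0, hrest]
      · by_cases ha : PySem.Chars.isIn pvArrow l = true
        · have hd : PySem.Chars.strIsdigit l = false := by
            cases hdd : PySem.Chars.strIsdigit l
            · rfl
            · rw [pv_digit_not_arrow l hdd] at ha; exact absurd ha (by simp)
          rw [pvLoopA_cons]
          simp only [hd, Bool.false_eq_true, if_false, ha, if_true]
          rw [pvBlocksB]
          simp only [if_neg hl]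
          rw [pv_blocksB_cons rest (cur ++ [l]) (by simp)]
          simp only [List.flatMap_cons, List.append_assoc, List.singleton_append]
          rw [pv_scanB_skip cur (l :: rest.takeWhile (· ≠ [])) (fun x hx => (hcur x hx).2),
              pv_scanB_arrow l _ ha]
          congr 1
          have hle : ((rest.dropWhile (· ≠ [])).dropWhile (· = [])).length ≤ n := by
            have := pv_lt1 l rest
            simp only [List.length_cons] at this
            omega
          exact ih _ hle [] (by simp)
        · rw [pv_loopA_skip rest l (by simpa using ha), pvBlocksB]
          simp only [if_neg hl]
          refine ih rest hlen (cur ++ [l]) ?_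
          intro x hx
          rcases List.mem_append.mp hx with h1 | h2
          · exact hcur x h1
          · simp at h2; subst h2; exact ⟨hl, by simpa using ha⟩

-- ===== VERDICT (by name: the statement is the Claim_ definition above) =====
theorem parse_srt_to_segments_py_spec : Claim_equal_parse_srt_to_segments_py := by
  intro s _
  unfold Spec_parse_srt_to_segments_py parse_srt_to_segments_py parse_srt_to_segments_py_alt
  by_cases h : s.toList = []
  · simp [h]
  · simp only [if_neg h]
    exact pv_main (pvLines s).length (pvLines s) le_rfl [] (by simp)
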